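-- pv_equiv track=rewrite | github.com/whad-team/whad-client | whad/bt_mesh/stack/utils.py | packet_encoding_to_key_indexes
-- ===== SOURCE A (Python) =====
-- def packet_encoding_to_key_indexes(packed_keys):
--     """
--     Unpacks a list of key indexes according to Mesh PRT Spec Section 4.3.1.1
--     (if not handled in Scapy, for unbound list of indexes)
--
--     :param packed_keys: Field in the packed of the indexes
--     :type key_indexes: Bytes
--     """
--
--     # Initialize an empty list to hold the unpacked integers
--     ints = []
--     if packed_keys is None or packed_keys == []:
--         return []
--
--     packed_bytes = packed_keys
--     # Process the packed bytes in chunks of 3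
--     for i in range(0, len(packed_bytes) - 2, 3):
--         # Read 3 bytes
--         byte1 = packed_bytes[i]
--         byte2 = packed_bytes[i + 1]
--         byte3 = packed_bytes[i + 2]
--
--         # Combine the bytes into two integers
--         packed = (
--             (byte3 << 16) | (byte2 << 8) | byte1
--         )  # Combine into a single 24-bit integer
--
--         # Extract the two integers
--         first_int = (packed >> 12) & 0xFFF  # Get the first 12 bits
--         second_int = packed & 0xFFF  # Get the last 12 bits
--
--         # Append the integers to the list
--         ints.append(first_int)
--         ints.append(second_int)
--
--     # Handle the last 2 bytes if the total number of bytes is odd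
--     if len(packed_bytes) % 3 == 2:
--         # Read the last 2 bytes
--         byte1 = packed_bytes[-2]
--         byte2 = packed_bytes[-1]
--
--         # Combine the bytes into the last integer
--         packed = (byte2 << 8) | byte1  # Combine into a single 16-bit integer
--
--         # Extract the last integer (with 4 bits of padding)
--         last_int = (packed >> 4) & 0xFFF  # Get the 12 bits of the last integer
--         ints.append(last_int)  # Append the last integer
--
--     return ints
-- ===== SOURCE B (Python) =====
-- def packet_encoding_to_key_indexes(packed_keys):
--     # Consume the bytes three at a time from a stack (top = next byte),
--     # extracting the two 12-bit values with divmod arithmetic instead of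
--     # an index loop with shift/mask extraction and a negative-index fixup.
--     stack = list(reversed(packed_keys)) if packed_keys else []
--     out = []
--     while len(stack) >= 3:
--         b1, b2, b3 = stack.pop(), stack.pop(), stack.pop()
--         packed = (b3 << 16) | (b2 << 8) | b1
--         hi, lo = divmod(packed, 4096)
--         out.append(hi % 4096)
--         out.append(lo)
--     if len(stack) == 2:
--         b1, b2 = stack.pop(), stack.pop()
--         out.append((((b2 << 8) | b1) // 16) % 4096)
--     return out
-- ===== Notes on version B (the rewrite author's own statement) =====
-- stated objective: alternative
-- what changed: Replaces A's index loop over range(0, len-2, 3) plus a separate post-loop negative-index fixup for a trailing 2-byte group by direct consumption of the list three elements at a time (tuple unpacking, list slicing), extracting the two 12-bit values with divmod/modulo arithmetic instead of shift-and-mask.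
import Mathlib
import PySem

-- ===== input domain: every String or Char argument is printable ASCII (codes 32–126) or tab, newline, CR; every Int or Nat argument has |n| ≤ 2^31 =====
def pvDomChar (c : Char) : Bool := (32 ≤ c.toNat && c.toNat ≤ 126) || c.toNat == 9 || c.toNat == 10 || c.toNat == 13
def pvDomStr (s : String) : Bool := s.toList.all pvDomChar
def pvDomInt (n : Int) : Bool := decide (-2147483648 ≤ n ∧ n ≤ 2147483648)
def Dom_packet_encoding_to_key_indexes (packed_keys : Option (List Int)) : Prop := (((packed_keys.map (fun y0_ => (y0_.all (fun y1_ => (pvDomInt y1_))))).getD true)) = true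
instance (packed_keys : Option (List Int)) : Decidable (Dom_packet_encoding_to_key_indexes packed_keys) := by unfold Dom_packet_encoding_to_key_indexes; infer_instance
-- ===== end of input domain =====

-- B replaces A's index loop over range(0, len-2, 3) (and its separate negative-index fixup
-- for a trailing two-byte group) by direct consumption of the list three elements at a time,
-- extracting the two 12-bit values with divmod arithmetic instead of shift/mask (alternative).

-- ===== PORT A =====
def packet_encoding_to_key_indexes (packed_keys : Option (List Int)) : List Int :=
  match packed_keys with
  | none => []
  | some packed_bytes =>
    if packed_bytes = [] then [] else
    -- for i in range(0, len(packed_bytes) - 2, 3): ints.append(first_int); ints.append(second_int)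
    let ints := (PySem.List.pyRange 0 ((packed_bytes.length : Int) - 2) 3).foldl
      (fun acc i =>
        let byte1 := PySem.List.pyGetD packed_bytes i 0
        let byte2 := PySem.List.pyGetD packed_bytes (i + 1) 0
        let byte3 := PySem.List.pyGetD packed_bytes (i + 2) 0
        let packed := PySem.Int.bor (PySem.Int.bor (byte3 <<< (16 : Nat)) (byte2 <<< (8 : Nat))) byte1
        let first_int := PySem.Int.band (packed >>> (12 : Nat)) 0xFFF
        let second_int := PySem.Int.band packed 0xFFF
        acc ++ [first_int, second_int]) []
    -- if len(packed_bytes) % 3 == 2: append the value packed from the last two bytes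
    if PySem.Int.mod (packed_bytes.length : Int) 3 = 2 then
      let byte1 := PySem.List.pyGetD packed_bytes (-2) 0
      let byte2 := PySem.List.pyGetD packed_bytes (-1) 0
      let packed := PySem.Int.bor (byte2 <<< (8 : Nat)) byte1
      ints ++ [PySem.Int.band (packed >>> (4 : Nat)) 0xFFF]
    else ints

-- ===== PORT B =====
-- B's while-loop popping three bytes at a time off the stack (top = next byte in order),
-- transcribed as structural recursion on the list of bytes in that same order.
def pvAltGo : List Int → List Int
  | b1 :: b2 :: b3 :: rest =>
    let packed := PySem.Int.bor (PySem.Int.bor (b3 <<< (16 : Nat)) (b2 <<< (8 : Nat))) b1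
    let hi := PySem.Int.floordiv packed 4096
    let lo := PySem.Int.mod packed 4096
    PySem.Int.mod hi 4096 :: lo :: pvAltGo rest
  | [b1, b2] =>
    [PySem.Int.mod (PySem.Int.floordiv (PySem.Int.bor (b2 <<< (8 : Nat)) b1) 16) 4096]
  | _ => []

def packet_encoding_to_key_indexes_alt (packed_keys : Option (List Int)) : List Int :=
  pvAltGo (packed_keys.getD [])

-- ===== PRECONDITION & SPEC =====
def Spec_packet_encoding_to_key_indexes (packed_keys : Option (List Int)) (out : List Int) : Prop := out = packet_encoding_to_key_indexes_alt packed_keys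
instance (packed_keys : Option (List Int)) (out : List Int) : Decidable (Spec_packet_encoding_to_key_indexes packed_keys out) := by unfold Spec_packet_encoding_to_key_indexes; infer_instance

-- ===== CLAIM (what is proved, stated in full; the proofs are below) =====
def Claim_equal_packet_encoding_to_key_indexes : Prop := ∀ (packed_keys : Option (List Int)), Dom_packet_encoding_to_key_indexes packed_keys → Spec_packet_encoding_to_key_indexes packed_keys (packet_encoding_to_key_indexes packed_keys)

-- ===== LEMMAS AND PROOFS =====

def pvChunk (l : List Int) (i : Int) : List Int :=
  let byte1 := PySem.List.pyGetD l i 0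
  let byte2 := PySem.List.pyGetD l (i + 1) 0
  let byte3 := PySem.List.pyGetD l (i + 2) 0
  let packed := PySem.Int.bor (PySem.Int.bor (byte3 <<< (16 : Nat)) (byte2 <<< (8 : Nat))) byte1
  [PySem.Int.band (packed >>> (12 : Nat)) 0xFFF, PySem.Int.band packed 0xFFF]

def pvTail (l : List Int) : List Int :=
  [PySem.Int.band ((PySem.Int.bor ((PySem.List.pyGetD l (-1) 0) <<< (8 : Nat)) (PySem.List.pyGetD l (-2) 0)) >>> (4 : Nat)) 0xFFF]

def pvACore (l : List Int) : List Int :=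
  let ints := (PySem.List.pyRange 0 ((l.length : Int) - 2) 3).foldl (fun acc i => acc ++ pvChunk l i) []
  if PySem.Int.mod (l.length : Int) 3 = 2 then ints ++ pvTail l else ints

lemma pv_band_mask (a : Int) : PySem.Int.band a 4095 = PySem.Int.mod a 4096 := by
  rw [PySem.Int.mod_eq_emod_of_pos (by norm_num : (0:Int) < 4096)]
  unfold PySem.Int.band
  have e : Int.toNat 4095 = 4095 := rfl
  split
  · rw [if_pos (by norm_num), e]
    have h : a.toNat &&& 4095 = a.toNat % 4096 := by
      simpa using Nat.and_two_pow_sub_one_eq_mod a.toNat 12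
    rw [h]; omega
  · rw [if_pos (by norm_num), e]
    have h : (4095 : Nat) &&& (-a - 1).toNat = (-a - 1).toNat % 4096 := by
      have := Nat.and_two_pow_sub_one_eq_mod (-a - 1).toNat 12
      rw [Nat.and_comm] at this
      simpa using this
    rw [h]; omega

lemma pv_shr12 (a : Int) : a >>> (12 : Nat) = PySem.Int.floordiv a 4096 := by
  rw [Int.shiftRight_eq_div_pow, PySem.Int.floordiv_eq_ediv_of_pos (by norm_num : (0:Int) < 4096)]
  norm_num

lemma pv_shr4 (a : Int) : a >>> (4 : Nat) = PySem.Int.floordiv a 16 := by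
  rw [Int.shiftRight_eq_div_pow, PySem.Int.floordiv_eq_ediv_of_pos (by norm_num : (0:Int) < 16)]
  norm_num

lemma pv_pyGetD_cons3 (x y z : Int) (t : List Int) (j : Int) (h : 0 ≤ j) :
    PySem.List.pyGetD (x :: y :: z :: t) (j + 3) 0 = PySem.List.pyGetD t j 0 := by
  rw [PySem.List.pyGetD_of_nonneg _ _ (by omega), PySem.List.pyGetD_of_nonneg _ _ h]
  have : (j + 3).toNat = j.toNat + 3 := by omega
  rw [this]
  rfl

lemma pv_pyGetD_cons3' (x y z : Int) (t : List Int) (j : Int) (h : 3 ≤ j) :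
    PySem.List.pyGetD (x :: y :: z :: t) j 0 = PySem.List.pyGetD t (j - 3) 0 := by
  have := pv_pyGetD_cons3 x y z t (j - 3) (by omega)
  rw [show j - 3 + 3 = j from by ring] at this
  exact this

lemma pv_chunk_cons3 (x y z : Int) (t : List Int) (k : Nat) :
    pvChunk (x :: y :: z :: t) (0 + 3 * ((k : Int) + 1)) = pvChunk t (0 + 3 * (k : Int)) := by
  simp only [pvChunk]
  rw [pv_pyGetD_cons3' _ _ _ _ _ (by omega), pv_pyGetD_cons3' _ _ _ _ _ (by omega),
      pv_pyGetD_cons3' _ _ _ _ _ (by omega)]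
  ring_nf

lemma pv_pyGetD_neg_cons (x : Int) (t : List Int) (i : Int) (h1 : i < 0) (h2 : -(t.length : Int) ≤ i) :
    PySem.List.pyGetD (x :: t) i 0 = PySem.List.pyGetD t i 0 := by
  simp only [PySem.List.pyGetD, PySem.List.pyGet?, PySem.List.pyIdx?, List.length_cons]
  have c1 : ¬ (0:Int) ≤ i := by omega
  have c2 : -(((t.length + 1 : Nat)) : Int) ≤ i := by omega
  have c3 : -((t.length : Nat) : Int) ≤ i := by omega
  simp only [if_neg c1, if_pos c2, if_pos c3]
  rw [show t.length + 1 - (-i).toNat = (t.length - (-i).toNat) + 1 from by omega]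
  simp

lemma pv_tail_cons (x : Int) (t : List Int) (h : 2 ≤ t.length) : pvTail (x :: t) = pvTail t := by
  unfold pvTail
  rw [pv_pyGetD_neg_cons _ _ _ (by omega) (by omega), pv_pyGetD_neg_cons _ _ _ (by omega) (by omega)]

lemma pv_core_flat (l : List Int) :
    pvACore l = (List.range (l.length / 3)).flatMap (fun (k : Nat) => pvChunk l (0 + 3 * (k : Int)))
      ++ (if PySem.Int.mod (l.length : Int) 3 = 2 then pvTail l else []) := by
  unfold pvACore
  rw [PySem.List.foldl_append_eq_flatMap, List.nil_append]
  have hr : PySem.List.pyRange 0 ((l.length : Int) - 2) 3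
      = (List.range (l.length / 3)).map (fun (k : Nat) => (0:Int) + 3 * (k : Int)) := by
    suffices h : (if (0:Int) < (l.length : Int) - 2
        then (((l.length : Int) - 2 - 0 + 3 - 1) / 3).toNat else 0) = l.length / 3 by
      rw [PySem.List.pyRange_of_pos _ _ (by norm_num : (0:Int) < 3), h]
    split <;> omega
  rw [hr, List.flatMap_map]
  split <;> simp

lemma pv_core_eq_go : ∀ (l : List Int), pvACore l = pvAltGo l
  | [] => by rfl
  | [a] => by rfl
  | [a, b] => by
    simp only [pvACore, pvAltGo, pvTail, List.length_cons, List.length_nil]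
    norm_num [PySem.List.pyRange]
    rw [PySem.List.pyGetD_neg_ofNat _ 2 0 (by omega) (by simp),
        PySem.List.pyGetD_neg_ofNat _ 1 0 (by omega) (by simp)]
    simp [pv_shr4, pv_band_mask]
  | a :: b :: c :: rest => by
    have IH := pv_core_eq_go rest
    rw [pv_core_flat]
    have hlen3 : (a :: b :: c :: rest).length / 3 = rest.length / 3 + 1 := by
      simp only [List.length_cons]; omega
    rw [hlen3, List.range_succ_eq_map]
    simp only [List.flatMap_cons, List.flatMap_map]
    have hshift : (fun (k : Nat) => pvChunk (a :: b :: c :: rest) (0 + 3 * ((k.succ : Nat) : Int)))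
        = (fun (k : Nat) => pvChunk rest (0 + 3 * (k : Int))) := by
      funext k
      rw [show ((k.succ : Nat) : Int) = (k : Int) + 1 from by push_cast; ring, pv_chunk_cons3]
    rw [hshift]
    have hchunk0 : pvChunk (a :: b :: c :: rest) (0 + 3 * ((0 : Nat) : Int))
        = [PySem.Int.mod (PySem.Int.floordiv
             (PySem.Int.bor (PySem.Int.bor (c <<< (16 : Nat)) (b <<< (8 : Nat))) a) 4096) 4096,
           PySem.Int.mod (PySem.Int.bor (PySem.Int.bor (c <<< (16 : Nat)) (b <<< (8 : Nat))) a) 4096] := by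
      norm_num [pvChunk, PySem.List.pyGetD_ofNat']
      refine ⟨?_, ?_⟩
      · rw [pv_band_mask, pv_shr12, PySem.Int.mod_eq_emod_of_pos (by norm_num : (0:Int) < 4096),
            PySem.Int.floordiv_eq_ediv_of_pos (by norm_num : (0:Int) < 4096)]
      · rw [pv_band_mask, PySem.Int.mod_eq_emod_of_pos (by norm_num : (0:Int) < 4096)]
    rw [hchunk0]
    have hmodiff : (PySem.Int.mod (((a :: b :: c :: rest).length : Int)) 3 = 2)
        ↔ (PySem.Int.mod ((rest.length : Int)) 3 = 2) := by
      rw [PySem.Int.mod_eq_emod_of_pos (by norm_num : (0:Int) < 3),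
          PySem.Int.mod_eq_emod_of_pos (by norm_num : (0:Int) < 3)]
      simp only [List.length_cons]
      constructor <;> intro h <;> [skip; skip] <;> push_cast at * <;> omega
    show _ = pvAltGo (a :: b :: c :: rest)
    simp only [pvAltGo]
    rw [← IH, pv_core_flat]
    by_cases hc : PySem.Int.mod ((rest.length : Int)) 3 = 2
    · have hrl : 2 ≤ rest.length := by
        rw [PySem.Int.mod_eq_emod_of_pos (by norm_num : (0:Int) < 3)] at hc
        omega
      rw [if_pos (hmodiff.mpr hc), if_pos hc]
      rw [pv_tail_cons _ _ (by simp), pv_tail_cons _ _ (by simp; omega), pv_tail_cons _ _ hrl]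
      simp
    · rw [if_neg (fun h => hc (hmodiff.mp h)), if_neg hc]
      simp
  termination_by l => l.length

lemma pv_A_eq_core (l : List Int) : packet_encoding_to_key_indexes (some l) = pvACore l := by
  cases l with
  | nil => rfl
  | cons x xs =>
    show (if x :: xs = [] then ([] : List Int) else _) = _
    rw [if_neg (by simp)]
    rfl

-- ===== VERDICT (by name: the statement is the Claim_ definition above) =====
theorem packet_encoding_to_key_indexes_spec : Claim_equal_packet_encoding_to_key_indexes := by
  intro packed_keys _
  unfold Spec_packet_encoding_to_key_indexes packet_encoding_to_key_indexes_alt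
  cases packed_keys with
  | none => rfl
  | some l => rw [pv_A_eq_core, pv_core_eq_go]; rfl
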